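-- pv_equiv track=rewrite | github.com/miguelcarcamov/miguelcarcamov.github.io | scripts/sync_ads_publications.py | _author_position_distribution
-- ===== SOURCE A (Python) =====
-- from typing import Any
--
-- def _author_position_distribution(entries: list[dict[str, Any]]) -> dict[str, int]:
--     result = {
--         "1": 0,
--         "2": 0,
--         "3": 0,
--         "4": 0,
--         "5": 0,
--         "6": 0,
--         "7+": 0,
--         "unknown": 0,
--     }
--     for entry in entries:
--         position = entry.get("author_position")
--         if position is None:
--             result["unknown"] += 1
--         elif position >= 7:
--             result["7+"] += 1
--         else:
--             result[str(position)] += 1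
--     return result
-- ===== SOURCE B (Python) =====
-- from typing import Any
--
-- def _author_position_distribution(entries: list[dict[str, Any]]) -> dict[str, int]:
--     # Project out the positions once, then build the result dict literal with
--     # one independent counting pass per bucket (no mutable accumulator dict).
--     positions = [entry.get("author_position") for entry in entries]
--     return {
--         "1": positions.count(1),
--         "2": positions.count(2),
--         "3": positions.count(3),
--         "4": positions.count(4),
--         "5": positions.count(5),
--         "6": positions.count(6),
--         "7+": sum(1 for p in positions if p is not None and p >= 7),
--         "unknown": positions.count(None),
--     }
-- ===== Notes on version B (the rewrite author's own statement) =====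
-- stated objective: simpler
-- what changed: B replaces A's single loop mutating an 8-key accumulator dict with a projection of the positions followed by one independent counting pass per bucket, assembling the result as a dict literal.
import Mathlib
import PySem

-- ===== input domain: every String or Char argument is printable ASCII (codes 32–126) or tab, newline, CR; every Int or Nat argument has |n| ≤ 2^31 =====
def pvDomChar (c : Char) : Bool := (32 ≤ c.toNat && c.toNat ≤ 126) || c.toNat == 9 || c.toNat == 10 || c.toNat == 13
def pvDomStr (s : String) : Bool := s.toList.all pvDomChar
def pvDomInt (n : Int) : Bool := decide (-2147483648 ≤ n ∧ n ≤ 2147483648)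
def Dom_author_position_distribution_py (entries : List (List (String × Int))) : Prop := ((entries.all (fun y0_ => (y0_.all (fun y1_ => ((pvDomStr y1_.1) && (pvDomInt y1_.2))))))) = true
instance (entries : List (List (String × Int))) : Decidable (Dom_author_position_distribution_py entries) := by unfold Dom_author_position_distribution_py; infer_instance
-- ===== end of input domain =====

-- B replaces A's single loop mutating an 8-key accumulator dict with a projection of the
-- positions followed by one independent counting pass per bucket (a dict literal); same
-- return value wherever A returns.

-- shared helper: entry.get("author_position")
def apLookup (entry : List (String × Int)) : Option Int :=
  (PySem.Dict.mk entry).get? "author_position"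

-- ===== PORT A =====
def author_position_distribution_py (entries : List (List (String × Int))) : List (String × Int) :=
  (entries.foldl
    (fun result entry =>
      match apLookup entry with
      | none => result.modify "unknown" 0 (· + 1)
      | some position =>
        if 7 ≤ position then result.modify "7+" 0 (· + 1)
        else result.modify (PySem.Int.toStr position) 0 (· + 1))
    (PySem.Dict.mk [("1", 0), ("2", 0), ("3", 0), ("4", 0), ("5", 0), ("6", 0), ("7+", 0), ("unknown", 0)])).items

-- ===== PORT B =====
def author_position_distribution_py_alt (entries : List (List (String × Int))) : List (String × Int) :=
  let positions := entries.map apLookup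
  [("1", (positions.count (some 1) : Int)),
   ("2", (positions.count (some 2) : Int)),
   ("3", (positions.count (some 3) : Int)),
   ("4", (positions.count (some 4) : Int)),
   ("5", (positions.count (some 5) : Int)),
   ("6", (positions.count (some 6) : Int)),
   ("7+", (positions.countP (fun p => match p with | some q => decide (7 ≤ q) | none => false) : Int)),
   ("unknown", (positions.count none : Int))]

-- ===== PRECONDITION & SPEC =====
-- Pre_ excludes exactly the inputs where some entry carries an author_position below 1: there
-- Python A raises KeyError at result[str(position)] and returns nothing.
def Pre_author_position_distribution_py (entries : List (List (String × Int))) : Prop :=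
  ∀ entry ∈ entries, 1 ≤ (apLookup entry).getD 1
instance (entries : List (List (String × Int))) : Decidable (Pre_author_position_distribution_py entries) := by unfold Pre_author_position_distribution_py; infer_instance

def pvWitness_author_position_distribution_py : (List (List (String × Int))) :=
  [[("author_position", 2)], [], [("author_position", 9), ("x", 1)]]

def Spec_author_position_distribution_py (entries : List (List (String × Int))) (out : List (String × Int)) : Prop := out = author_position_distribution_py_alt entries
instance (entries : List (List (String × Int))) (out : List (String × Int)) : Decidable (Spec_author_position_distribution_py entries out) := by unfold Spec_author_position_distribution_py; infer_instance

-- ===== CLAIM (what is proved, stated in full; the proofs are below) =====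
def Claim_equal_author_position_distribution_py : Prop := ∀ (entries : List (List (String × Int))), Dom_author_position_distribution_py entries → Pre_author_position_distribution_py entries → Spec_author_position_distribution_py entries (author_position_distribution_py entries)

-- ===== LEMMAS AND PROOFS =====

-- proof-side abbreviations for the statistics A accumulates
def posOf (entries : List (List (String × Int))) : List Int := entries.filterMap apLookup
def cnt (entries : List (List (String × Int))) (j : Int) : Int := ((posOf entries).count j : Int)
def cnt7 (entries : List (List (String × Int))) : Int := (((posOf entries).countP (fun p => 7 ≤ p)) : Int)
def cntU (entries : List (List (String × Int))) : Int := ((entries.countP (fun e => apLookup e == none)) : Int)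

-- invariant of A's single fold
lemma A_inv : ∀ (entries : List (List (String × Int))),
    Pre_author_position_distribution_py entries →
    ∀ (c1 c2 c3 c4 c5 c6 c7 c8 : Int),
    entries.foldl
      (fun result entry =>
        match apLookup entry with
        | none => result.modify "unknown" 0 (· + 1)
        | some position =>
          if 7 ≤ position then result.modify "7+" 0 (· + 1)
          else result.modify (PySem.Int.toStr position) 0 (· + 1))
      (PySem.Dict.mk [("1", c1), ("2", c2), ("3", c3), ("4", c4), ("5", c5), ("6", c6), ("7+", c7), ("unknown", c8)]) =
    PySem.Dict.mk [("1", c1 + cnt entries 1), ("2", c2 + cnt entries 2), ("3", c3 + cnt entries 3),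
      ("4", c4 + cnt entries 4), ("5", c5 + cnt entries 5), ("6", c6 + cnt entries 6),
      ("7+", c7 + cnt7 entries), ("unknown", c8 + cntU entries)] := by
  intro entries
  induction entries with
  | nil => intro _ c1 c2 c3 c4 c5 c6 c7 c8; simp [cnt, cnt7, cntU, posOf]
  | cons e es ih =>
    intro hpre c1 c2 c3 c4 c5 c6 c7 c8
    have hpre' : Pre_author_position_distribution_py es := fun x hx => hpre x (List.mem_cons_of_mem _ hx)
    have hpe := hpre e (List.mem_cons_self ..)
    rw [List.foldl_cons]
    rcases h : apLookup e with _ | p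
    · simp only [h]
      have hd : (PySem.Dict.mk [("1", c1), ("2", c2), ("3", c3), ("4", c4), ("5", c5), ("6", c6), ("7+", c7), ("unknown", c8)]).modify "unknown" 0 (· + 1)
          = PySem.Dict.mk [("1", c1), ("2", c2), ("3", c3), ("4", c4), ("5", c5), ("6", c6), ("7+", c7), ("unknown", c8 + 1)] := by
        simp [PySem.Dict.modify, PySem.Dict.insert, PySem.Dict.getD, PySem.Dict.get?, PySem.Dict.contains]
      rw [hd, ih hpre']
      simp [cnt, cnt7, cntU, posOf, List.filterMap_cons, h, List.countP_cons] <;> (push_cast; omega)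
    · simp only [h]
      rw [h] at hpe
      have hp1 : 1 ≤ p := by simpa using hpe
      by_cases h7 : 7 ≤ p
      · rw [if_pos h7]
        have hd : (PySem.Dict.mk [("1", c1), ("2", c2), ("3", c3), ("4", c4), ("5", c5), ("6", c6), ("7+", c7), ("unknown", c8)]).modify "7+" 0 (· + 1)
            = PySem.Dict.mk [("1", c1), ("2", c2), ("3", c3), ("4", c4), ("5", c5), ("6", c6), ("7+", c7 + 1), ("unknown", c8)] := by
          simp [PySem.Dict.modify, PySem.Dict.insert, PySem.Dict.getD, PySem.Dict.get?, PySem.Dict.contains]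
        rw [hd, ih hpre']
        have hc1 : (p :: posOf es).count 1 = (posOf es).count 1 := List.count_cons_of_ne (by omega)
        have hc2 : (p :: posOf es).count 2 = (posOf es).count 2 := List.count_cons_of_ne (by omega)
        have hc3 : (p :: posOf es).count 3 = (posOf es).count 3 := List.count_cons_of_ne (by omega)
        have hc4 : (p :: posOf es).count 4 = (posOf es).count 4 := List.count_cons_of_ne (by omega)
        have hc5 : (p :: posOf es).count 5 = (posOf es).count 5 := List.count_cons_of_ne (by omega)
        have hc6 : (p :: posOf es).count 6 = (posOf es).count 6 := List.count_cons_of_ne (by omega)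
        have hc7 : (p :: posOf es).countP (fun q => 7 ≤ q) = (posOf es).countP (fun q => 7 ≤ q) + 1 := by
          rw [List.countP_cons]; simp [h7]
        simp only [cnt, cnt7, cntU, posOf] at *
        simp [List.filterMap_cons, h, hc1, hc2, hc3, hc4, hc5, hc6, hc7, List.countP_cons] <;> (push_cast; omega)
      · rw [if_neg h7]
        push_neg at h7
        interval_cases p
        · rw [show PySem.Int.toStr 1 = "1" from by decide]
          have hd : (PySem.Dict.mk [("1", c1), ("2", c2), ("3", c3), ("4", c4), ("5", c5), ("6", c6), ("7+", c7), ("unknown", c8)]).modify "1" 0 (· + 1)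
              = PySem.Dict.mk [("1", c1 + 1), ("2", c2), ("3", c3), ("4", c4), ("5", c5), ("6", c6), ("7+", c7), ("unknown", c8)] := by
            simp [PySem.Dict.modify, PySem.Dict.insert, PySem.Dict.getD, PySem.Dict.get?, PySem.Dict.contains]
          rw [hd, ih hpre']
          simp [cnt, cnt7, cntU, posOf, List.filterMap_cons, h, List.count_cons, List.countP_cons] <;> (push_cast; omega)
        · rw [show PySem.Int.toStr 2 = "2" from by decide]
          have hd : (PySem.Dict.mk [("1", c1), ("2", c2), ("3", c3), ("4", c4), ("5", c5), ("6", c6), ("7+", c7), ("unknown", c8)]).modify "2" 0 (· + 1)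
              = PySem.Dict.mk [("1", c1), ("2", c2 + 1), ("3", c3), ("4", c4), ("5", c5), ("6", c6), ("7+", c7), ("unknown", c8)] := by
            simp [PySem.Dict.modify, PySem.Dict.insert, PySem.Dict.getD, PySem.Dict.get?, PySem.Dict.contains]
          rw [hd, ih hpre']
          simp [cnt, cnt7, cntU, posOf, List.filterMap_cons, h, List.count_cons, List.countP_cons] <;> (push_cast; omega)
        · rw [show PySem.Int.toStr 3 = "3" from by decide]
          have hd : (PySem.Dict.mk [("1", c1), ("2", c2), ("3", c3), ("4", c4), ("5", c5), ("6", c6), ("7+", c7), ("unknown", c8)]).modify "3" 0 (· + 1)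
              = PySem.Dict.mk [("1", c1), ("2", c2), ("3", c3 + 1), ("4", c4), ("5", c5), ("6", c6), ("7+", c7), ("unknown", c8)] := by
            simp [PySem.Dict.modify, PySem.Dict.insert, PySem.Dict.getD, PySem.Dict.get?, PySem.Dict.contains]
          rw [hd, ih hpre']
          simp [cnt, cnt7, cntU, posOf, List.filterMap_cons, h, List.count_cons, List.countP_cons] <;> (push_cast; omega)
        · rw [show PySem.Int.toStr 4 = "4" from by decide]
          have hd : (PySem.Dict.mk [("1", c1), ("2", c2), ("3", c3), ("4", c4), ("5", c5), ("6", c6), ("7+", c7), ("unknown", c8)]).modify "4" 0 (· + 1)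
              = PySem.Dict.mk [("1", c1), ("2", c2), ("3", c3), ("4", c4 + 1), ("5", c5), ("6", c6), ("7+", c7), ("unknown", c8)] := by
            simp [PySem.Dict.modify, PySem.Dict.insert, PySem.Dict.getD, PySem.Dict.get?, PySem.Dict.contains]
          rw [hd, ih hpre']
          simp [cnt, cnt7, cntU, posOf, List.filterMap_cons, h, List.count_cons, List.countP_cons] <;> (push_cast; omega)
        · rw [show PySem.Int.toStr 5 = "5" from by decide]
          have hd : (PySem.Dict.mk [("1", c1), ("2", c2), ("3", c3), ("4", c4), ("5", c5), ("6", c6), ("7+", c7), ("unknown", c8)]).modify "5" 0 (· + 1)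
              = PySem.Dict.mk [("1", c1), ("2", c2), ("3", c3), ("4", c4), ("5", c5 + 1), ("6", c6), ("7+", c7), ("unknown", c8)] := by
            simp [PySem.Dict.modify, PySem.Dict.insert, PySem.Dict.getD, PySem.Dict.get?, PySem.Dict.contains]
          rw [hd, ih hpre']
          simp [cnt, cnt7, cntU, posOf, List.filterMap_cons, h, List.count_cons, List.countP_cons] <;> (push_cast; omega)
        · rw [show PySem.Int.toStr 6 = "6" from by decide]
          have hd : (PySem.Dict.mk [("1", c1), ("2", c2), ("3", c3), ("4", c4), ("5", c5), ("6", c6), ("7+", c7), ("unknown", c8)]).modify "6" 0 (· + 1)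
              = PySem.Dict.mk [("1", c1), ("2", c2), ("3", c3), ("4", c4), ("5", c5), ("6", c6 + 1), ("7+", c7), ("unknown", c8)] := by
            simp [PySem.Dict.modify, PySem.Dict.insert, PySem.Dict.getD, PySem.Dict.get?, PySem.Dict.contains]
          rw [hd, ih hpre']
          simp [cnt, cnt7, cntU, posOf, List.filterMap_cons, h, List.count_cons, List.countP_cons] <;> (push_cast; omega)

-- bridges between A's filterMap statistics and B's per-bucket counts over entries.map apLookup
lemma cnt_eq (entries : List (List (String × Int))) (j : Int) :
    cnt entries j = ((entries.map apLookup).count (some j) : Int) := by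
  induction entries with
  | nil => simp [cnt, posOf]
  | cons e es ih =>
    simp only [cnt, posOf, List.filterMap_cons, List.map_cons] at *
    rcases h : apLookup e with _ | p
    · simpa [List.count_cons, h] using ih
    · simp only [List.count_cons]
      by_cases hp : p = j
      · subst hp; simp [List.count_cons, ih]
      · simp [List.count_cons, hp, ih]

lemma cnt7_eq (entries : List (List (String × Int))) :
    cnt7 entries = ((entries.map apLookup).countP (fun p => match p with | some q => decide (7 ≤ q) | none => false) : Int) := by
  induction entries with
  | nil => simp [cnt7, posOf]
  | cons e es ih =>
    simp only [cnt7, posOf, List.filterMap_cons, List.map_cons] at *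
    rcases h : apLookup e with _ | p
    · simpa [List.countP_cons] using ih
    · simp only [List.countP_cons]
      by_cases h7 : (7 : Int) ≤ p <;> simp [h7, ih] <;> push_cast <;> omega

lemma cntU_eq (entries : List (List (String × Int))) :
    cntU entries = ((entries.map apLookup).count none : Int) := by
  induction entries with
  | nil => simp [cntU]
  | cons e es ih =>
    simp only [cntU] at ih ⊢
    rcases h : apLookup e with _ | p <;>
      simp [List.countP_cons, List.count_cons, h] at ih ⊢ <;> omega

-- ===== VERDICT (by name: the statement is the Claim_ definition above) =====
theorem author_position_distribution_py_spec : Claim_equal_author_position_distribution_py := by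
  intro entries _ hpre
  unfold Spec_author_position_distribution_py
  simp only [author_position_distribution_py, author_position_distribution_py_alt]
  rw [A_inv entries hpre 0 0 0 0 0 0 0 0]
  simp [PySem.Dict.mk, PySem.Dict.items, PySem.Dict.insert, PySem.Dict.contains, PySem.Dict.empty,
    cnt_eq, cnt7_eq, cntU_eq]
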